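-- pv_equiv track=rewrite | github.com/Hal-ws/programmers | 12938.py | solution
-- ===== SOURCE A (Python) =====
-- def solution(n, s):
--     if s < n:
--         return [-1]
--     average = s // n
--     answer = [average for i in range(n)]
--     s -= (average * n)
--     for i in range(s):
--         answer[i] += 1
--     answer.sort()
--     return answer
-- ===== SOURCE B (Python) =====
-- def solution(n, s):
--     if s < n:
--         return [-1]
--     answer = []
--     while n > 0:
--         q = s // n
--         answer.append(q)
--         s -= q
--         n -= 1
--     return answer
-- ===== Notes on version B (the rewrite author's own statement) =====
-- stated objective: alternative
-- what changed: B is a greedy one-pass loop that repeatedly emits floor(remaining_sum / remaining_count) and shrinks both, which is provably nondecreasing, instead of A's build-average-list, spread-remainder, then sort.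
import Mathlib
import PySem

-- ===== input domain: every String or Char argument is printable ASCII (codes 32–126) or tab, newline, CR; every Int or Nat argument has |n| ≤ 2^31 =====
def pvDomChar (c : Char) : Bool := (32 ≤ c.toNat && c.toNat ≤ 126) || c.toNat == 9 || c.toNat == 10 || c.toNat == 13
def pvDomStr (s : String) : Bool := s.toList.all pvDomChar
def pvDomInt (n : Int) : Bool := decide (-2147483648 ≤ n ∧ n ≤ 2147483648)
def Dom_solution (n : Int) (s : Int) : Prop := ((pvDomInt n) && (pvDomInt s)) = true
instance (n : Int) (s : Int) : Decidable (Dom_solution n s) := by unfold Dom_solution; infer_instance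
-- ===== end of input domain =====

-- B replaces A's build-average-list / spread-remainder / sort pipeline with a greedy one-pass loop
-- emitting floor(remaining_sum / remaining_count) each step (objective: alternative).

-- ===== PORT A =====
def solution (n : Int) (s : Int) : List Int :=
  if s < n then [-1]
  else
    let average := PySem.Int.floordiv s n
    let answer := (PySem.List.pyRange 0 n 1).map (fun _ => average)
    let s' := s - average * n
    let answer := (PySem.List.pyRange 0 s' 1).foldl
      (fun acc i => PySem.List.pySetD acc i (PySem.List.pyGetD acc i 0 + 1)) answer
    PySem.List.sorted answer (fun x => x) false

-- ===== PORT B =====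
-- B's while loop: each iteration appends s // n and decrements n; fuel = n.toNat (n ≤ 0 never enters the loop).
def solutionAltLoop : Nat → Int → List Int
  | 0, _ => []
  | Nat.succ k, s =>
      let q := PySem.Int.floordiv s ((k : Int) + 1)
      q :: solutionAltLoop k (s - q)

def solution_alt (n : Int) (s : Int) : List Int :=
  if s < n then [-1]
  else solutionAltLoop n.toNat s

-- ===== PRECONDITION & SPEC =====
-- Pre_ excludes exactly n = 0 with s ≥ 0, where A raises ZeroDivisionError (s // n).
def Pre_solution (n : Int) (s : Int) : Prop := n ≠ 0 ∨ s < 0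
instance (n : Int) (s : Int) : Decidable (Pre_solution n s) := by unfold Pre_solution; infer_instance
def pvWitness_solution : Int × Int := (3, 11)

def Spec_solution (n : Int) (s : Int) (out : List Int) : Prop := out = solution_alt n s
instance (n : Int) (s : Int) (out : List Int) : Decidable (Spec_solution n s out) := by unfold Spec_solution; infer_instance

-- ===== CLAIM (what is proved, stated in full; the proofs are below) =====
def Claim_equal_solution : Prop := ∀ (n : Int) (s : Int), Dom_solution n s → Pre_solution n s → Spec_solution n s (solution n s)

-- ===== LEMMAS AND PROOFS =====

-- A's increment loop over range(k) on replicate m avg bumps the first k entries.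
theorem bump_loop (avg : Int) (m : Nat) :
    ∀ k : Nat, k ≤ m →
    (PySem.List.pyRange 0 (k : Int) 1).foldl
      (fun acc i => PySem.List.pySetD acc i (PySem.List.pyGetD acc i 0 + 1))
      (List.replicate m avg)
    = List.replicate k (avg + 1) ++ List.replicate (m - k) avg := by
  intro k
  induction k with
  | zero => intro _; simp [PySem.List.pyRange_one_eq_nil]
  | succ k ih =>
    intro hk
    have hk' : k ≤ m := Nat.le_of_succ_le hk
    have hr : PySem.List.pyRange 0 ((k : Int) + 1) 1
        = PySem.List.pyRange 0 (k : Int) 1 ++ [(k : Int)] :=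
      PySem.List.pyRange_one_succ_right (by exact_mod_cast Nat.zero_le k)
    have hcast : ((k.succ : Nat) : Int) = (k : Int) + 1 := by push_cast; ring
    rw [hcast, hr, List.foldl_append, ih hk']
    simp only [List.foldl_cons, List.foldl_nil]
    rw [PySem.List.pyGetD_natCast, PySem.List.pySetD_natCast]
    have hget : (List.replicate k (avg + 1) ++ List.replicate (m - k) avg).getD k 0 = avg := by
      rw [List.getD_eq_getElem?_getD, List.getElem?_append_right (by simp)]
      have h1 : m - k = (m - k - 1) + 1 := by omega
      rw [h1, List.replicate_succ]
      simp
    rw [hget]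
    rw [List.set_append_right k (avg + 1) (by simp)]
    have h1 : m - k = (m - (k + 1)) + 1 := by omega
    rw [h1, List.replicate_succ, List.replicate_succ']
    simp

-- B's greedy loop computes the canonical nondecreasing fair split.
theorem altLoop_eq (m : Nat) (s : Int) (hm : 0 < m) :
    solutionAltLoop m s
      = List.replicate (m - (PySem.Int.mod s m).toNat) (PySem.Int.floordiv s m)
        ++ List.replicate (PySem.Int.mod s m).toNat (PySem.Int.floordiv s m + 1) := by
  induction m generalizing s with
  | zero => omega
  | succ k ih =>
    have hmpos : (0 : Int) < (k : Int) + 1 := by positivity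
    have hcast : (((k + 1 : Nat)) : Int) = (k : Int) + 1 := by push_cast; ring
    set q := PySem.Int.floordiv s ((k : Int) + 1) with hq
    set r := PySem.Int.mod s ((k : Int) + 1) with hr
    have hfm : q * ((k : Int) + 1) + r = s := PySem.Int.floordiv_mul_add_mod s ((k : Int) + 1)
    have hr0 : 0 ≤ r := PySem.Int.mod_nonneg s hmpos
    have hrk : r < (k : Int) + 1 := PySem.Int.mod_lt s hmpos
    rcases Nat.eq_zero_or_pos k with hk0 | hkpos
    · subst hk0
      have : r = 0 := by omega
      simp only [solutionAltLoop, hcast, ← hq, ← hr, this]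
      norm_num
    · have hkpos' : (0 : Int) < (k : Int) := by exact_mod_cast hkpos
      -- unfold one step
      show (q :: solutionAltLoop k (s - q)) = _
      by_cases hrk' : r = (k : Int)
      · -- s - q = (q+1)*k : next divisor gives q+1 with remainder 0
        have hdiv : PySem.Int.floordiv (s - q) (k : Int) = q + 1 := by
          rw [PySem.Int.floordiv_eq_iff_of_pos hkpos']
          constructor <;> nlinarith
        have hmod : PySem.Int.mod (s - q) (k : Int) = 0 := by
          have := PySem.Int.floordiv_mul_add_mod (s - q) (k : Int)
          rw [hdiv] at this; nlinarith
        rw [ih (s - q) hkpos]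
        rw [show ((k : Nat) : Int) = (k : Int) from rfl] at hdiv hmod
        rw [hdiv, hmod]
        have hrnat : r.toNat = k := by omega
        rw [hcast, ← hq, ← hr, hrnat]
        simp [List.replicate_succ]
      · -- r < k : next divisor gives q with remainder r
        have hrklt : r < (k : Int) := by omega
        have hdiv : PySem.Int.floordiv (s - q) (k : Int) = q := by
          rw [PySem.Int.floordiv_eq_iff_of_pos hkpos']
          constructor <;> nlinarith
        have hmod : PySem.Int.mod (s - q) (k : Int) = r := by
          have := PySem.Int.floordiv_mul_add_mod (s - q) (k : Int)
          rw [hdiv] at this; nlinarith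
        rw [ih (s - q) hkpos, hdiv, hmod]
        rw [hcast, ← hq, ← hr]
        have h1 : (k + 1) - r.toNat = (k - r.toNat) + 1 := by omega
        rw [h1, List.replicate_succ]
        simp

theorem solution_eq (n s : Int) (h : ¬ s < n) (hn : n ≠ 0) :
    solution n s = solution_alt n s := by
  unfold solution solution_alt
  rw [if_neg h, if_neg h]
  rcases lt_trichotomy n 0 with hneg | hzero | hpos
  · -- n < 0 : A builds [], loop range empty (mod ≤ 0); B's fuel n.toNat = 0
    have hb := PySem.Int.mod_neg_bounds s hneg
    have hfm := PySem.Int.floordiv_mul_add_mod s n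
    simp only []
    rw [PySem.List.pyRange_one_eq_nil (a := 0) (b := n) (by omega)]
    rw [PySem.List.pyRange_one_eq_nil (a := 0) (b := s - PySem.Int.floordiv s n * n) (by omega)]
    have : n.toNat = 0 := by omega
    rw [this]
    simp [PySem.List.sorted, solutionAltLoop]
  · exact absurd hzero hn
  · -- n > 0
    have hfm := PySem.Int.floordiv_mul_add_mod s n
    have hr0 : 0 ≤ PySem.Int.mod s n := PySem.Int.mod_nonneg s hpos
    have hrn : PySem.Int.mod s n < n := PySem.Int.mod_lt s hpos
    set avg := PySem.Int.floordiv s n with havg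
    set r := PySem.Int.mod s n with hrr
    simp only []
    have hmod : s - avg * n = r := by omega
    rw [hmod]
    -- A side: the comprehension is replicate n avg
    have hmap : (PySem.List.pyRange 0 n 1).map (fun _ => avg) = List.replicate n.toNat avg := by
      rw [List.eq_replicate_iff]
      constructor
      · simp [PySem.List.length_pyRange_one]
      · intro b hb
        rcases List.mem_map.mp hb with ⟨_, _, hbe⟩
        exact hbe.symm
    rw [hmap]
    have hcastr : (r.toNat : Int) = r := Int.toNat_of_nonneg hr0
    have hloop := bump_loop avg n.toNat r.toNat (by omega)
    rw [hcastr] at hloop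
    rw [hloop]
    -- B side: the greedy loop computes the canonical sorted split
    have hcastn : ((n.toNat : Nat) : Int) = n := Int.toNat_of_nonneg (le_of_lt hpos)
    have halt := altLoop_eq n.toNat s (by omega)
    rw [hcastn] at halt
    rw [halt, ← havg, ← hrr]
    -- A's sort of the bumped list equals that canonical list
    have hperm : (List.replicate (n.toNat - r.toNat) avg ++ List.replicate r.toNat (avg + 1)).Perm
        (List.replicate r.toNat (avg + 1) ++ List.replicate (n.toNat - r.toNat) avg) :=
      List.perm_append_comm
    have hpw : (List.replicate (n.toNat - r.toNat) avg ++ List.replicate r.toNat (avg + 1)).Pairwise (· ≤ ·) := by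
      apply List.pairwise_append.mpr
      refine ⟨List.pairwise_replicate.mpr (by omega), List.pairwise_replicate.mpr (by omega), ?_⟩
      intro a ha b hb
      rw [List.eq_of_mem_replicate ha, List.eq_of_mem_replicate hb]
      omega
    rw [PySem.List.sorted_id_eq_of_perm_of_pairwise _ _ hperm hpw]

-- ===== VERDICT (by name: the statement is the Claim_ definition above) =====
theorem solution_spec : Claim_equal_solution := by
  intro n s _ hpre
  unfold Spec_solution
  by_cases hs : s < n
  · unfold solution solution_alt; rw [if_pos hs, if_pos hs]
  · have hn : n ≠ 0 := by
      rcases hpre with h | h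
      · exact h
      · intro h0; subst h0; exact hs h
    exact (solution_eq n s hs hn).symm ▸ rfl
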